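-- pv_equiv track=rewrite | github.com/Navezjt/tinygrad | examples/mlperf/helpers.py | _get_final_text
-- ===== SOURCE A (Python) =====
-- from collections import OrderedDict
-- import unicodedata
--
-- def _is_punctuation(char):
--   if (cp := ord(char)) in range(33, 48) or cp in range(58, 65) or cp in range(91, 97) or cp in range(123, 127):
--     return True
--   return unicodedata.category(char).startswith("P")
--
-- def _is_whitespace(char):
--   if char == " " or char == "\t" or char == "\n" or char == "\r":
--     return True
--   return unicodedata.category(char) == "Zs"
--
-- def _is_control(char):
--   if char == "\t" or char == "\n" or char == "\r":
--     return False
--   return unicodedata.category(char).startswith("C")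
--
-- def _run_split_on_punc(text):
--   if text in ("[UNK]", "[SEP]", "[PAD]", "[CLS]", "[MASK]"):
--     return [text]
--   start_new_word = True
--   output = []
--   for i in range(len(text)):
--     if _is_punctuation(char := text[i]):
--       output.append([char])
--       start_new_word = True
--     else:
--       if start_new_word:
--         output.append([])
--       start_new_word = False
--       output[-1].append(char)
--   return ["".join(x) for x in output]
--
-- def _run_strip_accents(text):
--   output = []
--   for char in unicodedata.normalize("NFD", text):
--     if unicodedata.category(char) != "Mn":
--       output.append(char)
--   return "".join(output)
--
-- def _clean_text(text):
--   output = []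
--   for char in text:
--     if not ((cp := ord(char)) == 0 or cp == 0xfffd or _is_control(char)):
--       output.append(" " if _is_whitespace(char) else char)
--   return "".join(output)
--
-- def _get_final_text(pred_text, orig_text):
--   def _strip_spaces(text):
--     ns_text = ""
--     ns_to_s_map = OrderedDict()
--     for i, c in enumerate(text):
--       if c == " ":
--         continue
--       ns_to_s_map[len(ns_text)] = i
--       ns_text += c
--     return ns_text, ns_to_s_map
--
--   orig_tokens = _clean_text(orig_text).strip().split()
--   split_tokens = []
--   for token in orig_tokens:
--     if token not in ("[UNK]", "[SEP]", "[PAD]", "[CLS]", "[MASK]"):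
--       token = token.lower()
--       token = _run_strip_accents(token)
--     split_tokens.extend(_run_split_on_punc(token))
--
--   tok_text = " ".join(" ".join(split_tokens).strip().split())
--   start_position = tok_text.find(pred_text)
--   if start_position == -1:
--     return orig_text
--   end_position = start_position + len(pred_text) - 1
--
--   orig_ns_text, orig_ns_to_s_map = _strip_spaces(orig_text)
--   tok_ns_text, tok_ns_to_s_map = _strip_spaces(tok_text)
--   if len(orig_ns_text) != len(tok_ns_text):
--     return orig_text
--   tok_s_to_ns_map = {v: k for k, v in tok_ns_to_s_map.items()}
--
--   orig_start_position = None
--   if start_position in tok_s_to_ns_map: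
--     if (ns_start_position := tok_s_to_ns_map[start_position]) in orig_ns_to_s_map:
--       orig_start_position = orig_ns_to_s_map[ns_start_position]
--   if orig_start_position is None:
--     return orig_text
--
--   orig_end_position = None
--   if end_position in tok_s_to_ns_map:
--     if (ns_end_position := tok_s_to_ns_map[end_position]) in orig_ns_to_s_map:
--       orig_end_position = orig_ns_to_s_map[ns_end_position]
--   if orig_end_position is None:
--     return orig_text
--
--   output_text = orig_text[orig_start_position:(orig_end_position + 1)]
--   return output_text
-- ===== SOURCE B (Python) =====
-- import unicodedata
--
-- def _is_punctuation(char):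
--   if (cp := ord(char)) in range(33, 48) or cp in range(58, 65) or cp in range(91, 97) or cp in range(123, 127):
--     return True
--   return unicodedata.category(char).startswith("P")
--
-- def _is_whitespace(char):
--   if char == " " or char == "\t" or char == "\n" or char == "\r":
--     return True
--   return unicodedata.category(char) == "Zs"
--
-- def _is_control(char):
--   if char == "\t" or char == "\n" or char == "\r":
--     return False
--   return unicodedata.category(char).startswith("C")
--
-- def _run_split_on_punc(text):
--   if text in ("[UNK]", "[SEP]", "[PAD]", "[CLS]", "[MASK]"):
--     return [text]
--   start_new_word = True
--   output = []
--   for i in range(len(text)):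
--     if _is_punctuation(char := text[i]):
--       output.append([char])
--       start_new_word = True
--     else:
--       if start_new_word:
--         output.append([])
--       start_new_word = False
--       output[-1].append(char)
--   return ["".join(x) for x in output]
--
-- def _run_strip_accents(text):
--   output = []
--   for char in unicodedata.normalize("NFD", text):
--     if unicodedata.category(char) != "Mn":
--       output.append(char)
--   return "".join(output)
--
-- def _clean_text(text):
--   output = []
--   for char in text:
--     if not ((cp := ord(char)) == 0 or cp == 0xfffd or _is_control(char)):
--       output.append(" " if _is_whitespace(char) else char)
--   return "".join(output)
--
-- def _get_final_text(pred_text, orig_text):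
--   # cleaning/tokenizing pipeline identical to the original
--   orig_tokens = _clean_text(orig_text).strip().split()
--   split_tokens = []
--   for token in orig_tokens:
--     if token not in ("[UNK]", "[SEP]", "[PAD]", "[CLS]", "[MASK]"):
--       token = _run_strip_accents(token.lower())
--     split_tokens.extend(_run_split_on_punc(token))
--   tok_text = " ".join(" ".join(split_tokens).strip().split())
--
--   start = tok_text.find(pred_text)
--   if start == -1:
--     return orig_text
--   end = start + len(pred_text) - 1
--
--   # rank/select counting instead of position maps: both strings must hold the
--   # same number of non-space characters; an endpoint maps to the index of the
--   # non-space character of orig_text with the same rank.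
--   if sum(1 for c in orig_text if c != " ") != sum(1 for c in tok_text if c != " "):
--     return orig_text
--
--   def pos_ok(i):
--     return 0 <= i < len(tok_text) and tok_text[i] != " "
--   if not (pos_ok(start) and pos_ok(end)):
--     return orig_text
--
--   k1 = sum(1 for c in tok_text[:start] if c != " ")
--   k2 = sum(1 for c in tok_text[:end] if c != " ")
--
--   def nth_nonspace(k):
--     for i, c in enumerate(orig_text):
--       if c != " ":
--         if k == 0:
--           return i
--         k -= 1
--
--   return orig_text[nth_nonspace(k1):nth_nonspace(k2) + 1]
-- ===== Notes on version B (the rewrite author's own statement) =====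
-- stated objective: simpler
-- what changed: B keeps A's cleaning/tokenizing pipeline and tok_text.find step but builds no position maps at all: instead of A's two OrderedDicts plus an inverted dict, B maps each endpoint by rank/select counting - it counts the non-space characters of tok_text before the endpoint and scans orig_text for the non-space character of that rank.
import Mathlib
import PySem

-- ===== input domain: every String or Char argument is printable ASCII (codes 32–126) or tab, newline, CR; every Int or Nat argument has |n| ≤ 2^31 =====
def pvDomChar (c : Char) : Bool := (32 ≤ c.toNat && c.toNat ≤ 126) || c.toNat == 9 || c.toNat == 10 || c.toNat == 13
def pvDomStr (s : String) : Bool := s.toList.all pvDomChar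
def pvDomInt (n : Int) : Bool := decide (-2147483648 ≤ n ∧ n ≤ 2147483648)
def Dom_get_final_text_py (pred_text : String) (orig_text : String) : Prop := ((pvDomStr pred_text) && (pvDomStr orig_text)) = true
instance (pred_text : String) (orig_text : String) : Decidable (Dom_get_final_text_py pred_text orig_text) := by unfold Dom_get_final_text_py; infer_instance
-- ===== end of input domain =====

-- B keeps A's cleaning/tokenising pipeline but drops the three position dictionaries entirely:
-- it maps an endpoint by counting (rank of the endpoint among non-space chars of tok_text, then
-- a scan for the char of that rank in orig_text) (objective: simpler; equal cost).

-- ===== PORT A =====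
-- Helpers shared by both ports: the cleaning/tokenising pipeline is the identical Python code in
-- Source A and Source B. unicodedata notes (ports exact on the printable-ASCII + tab/newline/CR domain):
-- there the `unicodedata.category` fallbacks of _is_punctuation/_is_whitespace are False, the
-- category of every remaining char in _is_control is not "C", and NFD normalisation is the
-- identity with no "Mn" characters.
def pvSpecial (t : List Char) : Bool :=
  t == "[UNK]".toList || t == "[SEP]".toList || t == "[PAD]".toList || t == "[CLS]".toList || t == "[MASK]".toList

def pvIsPunctuation (c : Char) : Bool :=
  let cp := c.toNat
  if (33 ≤ cp && cp < 48) || (58 ≤ cp && cp < 65) || (91 ≤ cp && cp < 97) || (123 ≤ cp && cp < 127) then true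
  else false  -- unicodedata.category(char).startswith("P"): False on the rest of the ASCII domain

def pvIsWhitespace (c : Char) : Bool :=
  if c == ' ' || c == '\t' || c == '\n' || c == '\r' then true
  else false  -- unicodedata.category(char) == "Zs": False on the rest of the ASCII domain

def pvIsControl (c : Char) : Bool :=
  if c == '\t' || c == '\n' || c == '\r' then false
  else false  -- unicodedata.category(char).startswith("C"): False on the printable-ASCII domain

def pvAppendLast (xs : List (List Char)) (c : Char) : List (List Char) :=
  match xs with
  | [] => []        -- unreachable in the loop: output[-1] exists when start_new_word was consumed
  | [x] => [x ++ [c]]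
  | x :: y :: rest => x :: pvAppendLast (y :: rest) c

def pvRunSplitOnPunc (text : List Char) : List (List Char) :=
  if pvSpecial text then [text]
  else
    (text.foldl (fun (s : List (List Char) × Bool) c =>
        if pvIsPunctuation c then (s.1 ++ [[c]], true)
        else (pvAppendLast (if s.2 then s.1 ++ [[]] else s.1) c, false))
      ([], true)).1

def pvRunStripAccents (text : List Char) : List Char :=
  -- NFD is the identity and no char has category "Mn" on the ASCII domain: every char is kept
  text.foldl (fun out c => out ++ [c]) []

def pvCleanText (text : List Char) : List Char :=
  text.foldl (fun out c =>
    if c.toNat == 0 || c.toNat == 0xfffd || pvIsControl c then out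
    else out ++ [if pvIsWhitespace c then ' ' else c]) []

def pvTokText (orig_text : List Char) : List Char :=
  let orig_tokens := PySem.Chars.split₀ (PySem.Chars.strip (pvCleanText orig_text))
  let split_tokens := orig_tokens.foldl (fun acc token =>
    acc ++ pvRunSplitOnPunc (if pvSpecial token then token else pvRunStripAccents (PySem.Chars.lower token))) []
  PySem.Chars.join [' '] (PySem.Chars.split₀ (PySem.Chars.strip (PySem.Chars.join [' '] split_tokens)))

-- _strip_spaces: ns_to_s_map[len(ns_text)] = i happens before ns_text += c
def pvStripStep (s : List Char × PySem.Dict Int Int) (p : Int × Char) : List Char × PySem.Dict Int Int :=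
  if p.2 == ' ' then s
  else (s.1 ++ [p.2], s.2.insert (s.1.length : Int) p.1)

def get_final_text_py (pred_text : String) (orig_text : String) : String :=
  let tok_text := pvTokText orig_text.toList
  let start_position := PySem.Chars.find tok_text pred_text.toList
  if start_position = -1 then orig_text
  else
    let end_position := start_position + (pred_text.toList.length : Int) - 1
    let orig_strip := (PySem.List.enumerate orig_text.toList 0).foldl pvStripStep ([], PySem.Dict.empty)
    let tok_strip := (PySem.List.enumerate tok_text 0).foldl pvStripStep ([], PySem.Dict.empty)
    if orig_strip.1.length ≠ tok_strip.1.length then orig_text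
    else
      -- {v: k for k, v in tok_ns_to_s_map.items()}
      let tok_s_to_ns := PySem.Dict.ofList (tok_strip.2.items.map (fun p => (p.2, p.1)))
      match tok_s_to_ns.get? start_position with
      | none => orig_text
      | some ns_start =>
        match orig_strip.2.get? ns_start with
        | none => orig_text
        | some orig_start =>
          match tok_s_to_ns.get? end_position with
          | none => orig_text
          | some ns_end =>
            match orig_strip.2.get? ns_end with
            | none => orig_text
            | some orig_end =>
              String.ofList (PySem.List.slice orig_text.toList (some orig_start) (some (orig_end + 1)))

-- ===== PORT B =====
-- pos_ok(i): 0 <= i < len(tok_text) and tok_text[i] != " "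
def pvPosOk (l : List Char) (i : Int) : Bool :=
  decide (0 ≤ i) && decide (i < (l.length : Int)) && (l.getD i.toNat ' ' != ' ')

-- nth_nonspace(k): index of the k-th (0-based) non-space character, scanning left to right
def pvNthNonspace : List Char → Int → Nat → Option Int
  | [], _, _ => none
  | c :: r, i, k =>
    if c != ' ' then
      match k with
      | 0 => some i
      | k' + 1 => pvNthNonspace r (i + 1) k'
    else pvNthNonspace r (i + 1) k

def get_final_text_py_alt (pred_text : String) (orig_text : String) : String :=
  let tok_text := pvTokText orig_text.toList
  let start := PySem.Chars.find tok_text pred_text.toList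
  if start = -1 then orig_text
  else
    let endp := start + (pred_text.toList.length : Int) - 1
    if orig_text.toList.countP (· != ' ') ≠ tok_text.countP (· != ' ') then orig_text
    else if !(pvPosOk tok_text start && pvPosOk tok_text endp) then orig_text
    else
      match pvNthNonspace orig_text.toList 0 ((tok_text.take start.toNat).countP (· != ' ')),
            pvNthNonspace orig_text.toList 0 ((tok_text.take endp.toNat).countP (· != ' ')) with
      | some os, some oe => String.ofList (PySem.List.slice orig_text.toList (some os) (some (oe + 1)))
      | _, _ => orig_text  -- unreachable: each rank is below the shared non-space count

-- ===== PRECONDITION & SPEC =====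
def Spec_get_final_text_py (pred_text : String) (orig_text : String) (out : String) : Prop := out = get_final_text_py_alt pred_text orig_text
instance (pred_text : String) (orig_text : String) (out : String) : Decidable (Spec_get_final_text_py pred_text orig_text out) := by unfold Spec_get_final_text_py; infer_instance

-- ===== CLAIM (what is proved, stated in full; the proofs are below) =====
def Claim_equal_get_final_text_py : Prop := ∀ (pred_text : String) (orig_text : String), Dom_get_final_text_py pred_text orig_text → Spec_get_final_text_py pred_text orig_text (get_final_text_py pred_text orig_text)

-- ===== LEMMAS AND PROOFS =====

-- proof-side abstraction: the list of indices (offset n) of the non-space characters of l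
def nsIdx : List Char → Int → List Int
  | [], _ => []
  | c :: r, n => if c != ' ' then n :: nsIdx r (n + 1) else nsIdx r (n + 1)

theorem pv_nth_eq_getElem (l : List Char) : ∀ (n : Int) (k : Nat),
    pvNthNonspace l n k = (nsIdx l n)[k]? := by
  induction l with
  | nil => intro n k; simp [pvNthNonspace, nsIdx]
  | cons c r ih =>
    intro n k
    by_cases hc : (c != ' ') = true
    · cases k with
      | zero => simp [pvNthNonspace, nsIdx, hc]
      | succ k' => simp [pvNthNonspace, nsIdx, hc, ih]
    · simp only [Bool.not_eq_true] at hc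
      simp [pvNthNonspace, nsIdx, hc, ih]

theorem pv_nsIdx_length (l : List Char) : ∀ n, (nsIdx l n).length = l.countP (· != ' ') := by
  induction l with
  | nil => intro n; simp [nsIdx]
  | cons c r ih =>
    intro n
    by_cases hc : (c != ' ') = true
    · simp [nsIdx, hc, ih]
    · simp only [Bool.not_eq_true] at hc
      simp [nsIdx, hc, ih]

theorem pv_nsIdx_take (l : List Char) : ∀ (n : Int) (i : Nat), i < l.length →
    (l.getD i ' ' != ' ') = true →
    (nsIdx l n)[(l.take i).countP (· != ' ')]? = some (n + i) := by
  induction l with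
  | nil => intro n i hi; simp at hi
  | cons c r ih =>
    intro n i hi hg
    cases i with
    | zero =>
      simp only [List.getD_cons_zero] at hg
      simp [nsIdx, hg]
    | succ i' =>
      simp only [List.getD_cons_succ] at hg
      simp only [List.length_cons, Nat.add_lt_add_iff_right] at hi
      have hrec := ih (n + 1) i' hi hg
      have hcast : n + 1 + (i' : Int) = n + ((i' + 1 : Nat) : Int) := by push_cast; ring
      by_cases hc : (c != ' ') = true
      · simp only [List.take_succ_cons, List.countP_cons, hc, if_pos]
        simp only [nsIdx, hc, if_pos]
        rw [List.getElem?_cons_succ, hrec, hcast]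
      · simp only [Bool.not_eq_true] at hc
        simp only [List.take_succ_cons, List.countP_cons, nsIdx, hc]
        simp only [Bool.false_eq_true, if_false, Nat.add_zero]
        rw [hrec, hcast]

theorem pv_nsIdx_mem (l : List Char) : ∀ (n : Int) (k : Int),
    k ∈ nsIdx l n ↔ ∃ i : Nat, i < l.length ∧ (l.getD i ' ' != ' ') = true ∧ k = n + i := by
  induction l with
  | nil => intro n k; simp [nsIdx]
  | cons c r ih =>
    intro n k
    constructor
    · intro hk
      by_cases hc : (c != ' ') = true
      · simp only [nsIdx, hc, if_pos, List.mem_cons] at hk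
        rcases hk with rfl | hk
        · exact ⟨0, by simp, by simpa using hc, by simp⟩
        · obtain ⟨i, hi, hg, hki⟩ := (ih (n + 1) k).mp hk
          exact ⟨i + 1, by simp [hi], by simpa using hg, by push_cast [hki]; ring⟩
      · simp only [Bool.not_eq_true] at hc
        simp only [nsIdx, hc] at hk
        simp only [Bool.false_eq_true, if_false] at hk
        obtain ⟨i, hi, hg, hki⟩ := (ih (n + 1) k).mp hk
        exact ⟨i + 1, by simp [hi], by simpa using hg, by push_cast [hki]; ring⟩
    · rintro ⟨i, hi, hg, rfl⟩
      cases i with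
      | zero =>
        simp only [List.getD_cons_zero] at hg
        simp [nsIdx, hg]
      | succ i' =>
        simp only [List.getD_cons_succ] at hg
        simp only [List.length_cons, Nat.add_lt_add_iff_right] at hi
        have : n + ((i' + 1 : Nat) : Int) = (n + 1) + i' := by push_cast; ring
        rw [this]
        have hmem := (ih (n + 1) ((n + 1) + i')).mpr ⟨i', hi, hg, rfl⟩
        by_cases hc : (c != ' ') = true
        · simp [nsIdx, hc, hmem]
        · simp only [Bool.not_eq_true] at hc
          simp [nsIdx, hc, hmem]

theorem pv_posOk_iff_mem (l : List Char) (k : Int) : pvPosOk l k = true ↔ k ∈ nsIdx l 0 := by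
  rw [pv_nsIdx_mem]
  unfold pvPosOk
  simp only [Bool.and_eq_true, decide_eq_true_eq]
  constructor
  · rintro ⟨⟨h0, hlen⟩, hg⟩
    refine ⟨k.toNat, by omega, hg, by omega⟩
  · rintro ⟨i, hi, hg, rfl⟩
    have : ((0 : Int) + i).toNat = i := by omega
    rw [this]
    exact ⟨⟨by omega, by omega⟩, hg⟩

theorem pv_nsIdx_enum (l : List Char) : ∀ n : Int,
    ((PySem.List.enumerate l n).filter (fun p => p.2 != ' ')).map (·.1) = nsIdx l n := by
  induction l with
  | nil => intro n; simp [nsIdx]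
  | cons c r ih =>
    intro n
    rw [PySem.List.enumerate_cons]
    by_cases hc : (c != ' ') = true
    · simp [hc, nsIdx, ih]
    · simp only [Bool.not_eq_true] at hc
      simp [hc, nsIdx, ih]

theorem pv_strip_fold (l : List (Int × Char)) : ∀ (ns : List Char) (d : PySem.Dict Int Int),
    (∀ k ∈ d.keys, k < (ns.length : Int)) →
    (l.foldl pvStripStep (ns, d)).1 = ns ++ (l.filter (fun p => p.2 != ' ')).map (·.2) ∧
    (l.foldl pvStripStep (ns, d)).2.items
      = d.items ++ (((l.filter (fun p => p.2 != ' ')).map (·.1)).zipIdx ns.length).map (fun q => ((q.2 : Int), q.1)) := by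
  induction l with
  | nil => intro ns d h; simp
  | cons x l ih =>
    intro ns d h
    by_cases hx : x.2 == ' '
    · have hx' : x.2 = ' ' := by simpa using hx
      simpa [pvStripStep, hx, List.filter_cons, hx'] using ih ns d h
    · have hx' : ¬ x.2 = ' ' := by simpa using hx
      have hc : d.contains ((ns.length : Nat) : Int) = false := by
        rw [PySem.Dict.contains_eq_decide_mem_keys]
        simp only [decide_eq_false_iff_not]
        intro hmem
        exact absurd (h _ hmem) (lt_irrefl _)
      have hkeys : ∀ k ∈ (d.insert ((ns.length : Nat) : Int) x.1).keys, k < ((ns ++ [x.2]).length : Int) := by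
        rw [PySem.Dict.keys_insert_of_not_contains d x.1 hc]
        intro k hk
        simp only [List.mem_append, List.mem_singleton] at hk
        rcases hk with hk | rfl
        · have := h k hk; simp; omega
        · simp
      have hrec := ih (ns ++ [x.2]) (d.insert ((ns.length : Nat) : Int) x.1) hkeys
      rw [PySem.Dict.items_insert_of_not_contains d x.1 hc] at hrec
      simp only [List.foldl_cons, pvStripStep, hx, if_neg, Bool.false_eq_true, not_false_iff]
      refine ⟨?_, ?_⟩
      · rw [hrec.1]; simp [hx']
      · rw [hrec.2]; simp [hx', List.zipIdx_cons, List.append_assoc]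

theorem pv_items_ofList (l : List (Int × Int)) (h : (l.map Prod.fst).Nodup) :
    (PySem.Dict.ofList l).items = l := by
  have hfresh : ∀ a ∈ l, PySem.Dict.empty.contains a.1 = false := fun a _ => PySem.Dict.contains_empty (κ := Int) (ν := Int) a.1
  have := PySem.Dict.items_foldl_insert_fresh l Prod.fst Prod.snd PySem.Dict.empty hfresh h
  simpa [PySem.Dict.ofList, PySem.Dict.update, PySem.Dict.empty] using this

theorem pv_zip_fst (L : List Int) : ∀ n : Nat,
    ((L.zipIdx n).map (fun q => (q.1, (q.2 : Int)))).map Prod.fst = L := by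
  induction L with
  | nil => intro n; simp
  | cons x L ih => intro n; simp only [List.zipIdx_cons, List.map_cons]; rw [ih (n+1)]

theorem pv_dorig_get (L : List Int) (d : PySem.Dict Int Int)
    (hd : d.items = (L.zipIdx 0).map (fun q => ((q.2 : Int), q.1))) (k : Nat) :
    d.get? (k : Int) = L[k]? := by
  have hkeys : d.keys = (L.zipIdx 0).map (fun q => ((q.2 : Nat) : Int)) := by
    simp [PySem.Dict.keys, hd, List.map_map, Function.comp_def]
  have hkeys' : d.keys = (List.range' 0 L.length).map (fun n : Nat => (n : Int)) := by
    rw [hkeys, ← List.zipIdx_map_snd 0 L, List.map_map]; rfl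
  have hnodup : d.keys.Nodup := by
    rw [hkeys']
    exact ((List.nodup_range' 1).map (fun a b hab => by exact_mod_cast hab))
  by_cases hk : k < L.length
  · have : d.get? (k : Int) = some L[k] := by
      rw [PySem.Dict.get?_eq_some_iff_mem_items d (k : Int) L[k] hnodup, hd]
      refine List.mem_iff_getElem.mpr ⟨k, by simpa using hk, ?_⟩
      simp [List.getElem_zipIdx]
    rw [this, List.getElem?_eq_getElem hk]
  · have : d.get? (k : Int) = none := by
      rw [PySem.Dict.get?_eq_none_iff_not_mem_keys, hkeys']
      simp only [List.mem_map, List.mem_range'_1, not_exists]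
      rintro n ⟨hn, hnk⟩
      have : n = k := by exact_mod_cast hnk
      omega
    rw [this, List.getElem?_eq_none (by omega)]

-- A's two-stage dict lookup for a key equals B's rank-then-select counting for that key
theorem pv_lookup_rank (tok orig : List Char) (dinv dorig : PySem.Dict Int Int)
    (hinv : dinv.items = ((nsIdx tok 0).zipIdx 0).map (fun q => (q.1, (q.2 : Int))))
    (horig : dorig.items = ((nsIdx orig 0).zipIdx 0).map (fun q => ((q.2 : Int), q.1)))
    (htn : (nsIdx tok 0).Nodup) (k : Int) :
    (match dinv.get? k with
     | none => none
     | some j => dorig.get? j)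
      = if pvPosOk tok k then pvNthNonspace orig 0 ((tok.take k.toNat).countP (· != ' ')) else none := by
  have hinvkeys : dinv.keys = nsIdx tok 0 := by
    show List.map Prod.fst dinv.items = _
    rw [hinv]; exact pv_zip_fst (nsIdx tok 0) 0
  by_cases hp : pvPosOk tok k = true
  · rw [if_pos hp]
    have hm := (pv_posOk_iff_mem tok k).mp hp
    -- unpack pos_ok
    have hparts : (0 ≤ k ∧ k < (tok.length : Int)) ∧ (tok.getD k.toNat ' ' != ' ') = true := by
      have := hp
      unfold pvPosOk at this
      simpa only [Bool.and_eq_true, decide_eq_true_eq] using this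
    set rk := (tok.take k.toNat).countP (· != ' ') with hrk
    have hsel : (nsIdx tok 0)[rk]? = some k := by
      have := pv_nsIdx_take tok 0 k.toNat (by omega) hparts.2
      rw [← hrk] at this
      rw [this]
      congr 1
      omega
    have hrklt : rk < (nsIdx tok 0).length := by
      have := List.getElem?_eq_some_iff.mp hsel
      exact this.1
    have hgetk : (nsIdx tok 0)[rk] = k := by
      have := List.getElem?_eq_some_iff.mp hsel
      exact this.2
    have h1 : dinv.get? k = some (rk : Int) := by
      rw [PySem.Dict.get?_eq_some_iff_mem_items dinv k (rk : Int) (hinvkeys ▸ htn), hinv]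
      refine List.mem_iff_getElem.mpr ⟨rk, by simpa using hrklt, ?_⟩
      simp [List.getElem_zipIdx, hgetk]
    rw [h1]
    show dorig.get? (rk : Int) = _
    rw [pv_dorig_get (nsIdx orig 0) dorig horig rk, pv_nth_eq_getElem]
  · rw [if_neg hp]
    have hnm : k ∉ nsIdx tok 0 := fun h => hp ((pv_posOk_iff_mem tok k).mpr h)
    have h1 : dinv.get? k = none := by
      rw [PySem.Dict.get?_eq_none_iff_not_mem_keys, hinvkeys]; exact hnm
    rw [h1]

theorem pv_items_empty : (PySem.Dict.empty : PySem.Dict Int Int).items = [] := rfl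

-- ===== VERDICT (by name: the statement is the Claim_ definition above) =====
set_option maxHeartbeats 2000000 in
theorem get_final_text_py_spec : Claim_equal_get_final_text_py := by
  unfold Claim_equal_get_final_text_py Spec_get_final_text_py
  intro pred_text orig_text _
  by_cases hf : PySem.Chars.find (pvTokText orig_text.toList) pred_text.toList = -1
  · unfold get_final_text_py get_final_text_py_alt
    dsimp only
    rw [if_pos hf, if_pos hf]
  · unfold get_final_text_py get_final_text_py_alt
    dsimp only
    rw [if_neg hf, if_neg hf]
    set tok := pvTokText orig_text.toList with htok
    set og := orig_text.toList with hog
    set s := PySem.Chars.find tok pred_text.toList with hs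
    set e := s + (pred_text.toList.length : Int) - 1 with he
    set FO := (PySem.List.enumerate og 0).foldl pvStripStep ([], PySem.Dict.empty) with hFO
    set FT := (PySem.List.enumerate tok 0).foldl pvStripStep ([], PySem.Dict.empty) with hFT
    have hO := pv_strip_fold (PySem.List.enumerate og 0) [] PySem.Dict.empty
      (by intro k hk; simp [PySem.Dict.keys_empty] at hk)
    have hT := pv_strip_fold (PySem.List.enumerate tok 0) [] PySem.Dict.empty
      (by intro k hk; simp [PySem.Dict.keys_empty] at hk)
    simp only [← hFO, ← hFT, pv_items_empty, List.nil_append, List.length_nil] at hO hT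
    -- enumerate-filter-map is nsIdx
    have heo : ((PySem.List.enumerate og 0).filter (fun p => p.2 != ' ')).map (·.1) = nsIdx og 0 :=
      pv_nsIdx_enum og 0
    have het : ((PySem.List.enumerate tok 0).filter (fun p => p.2 != ' ')).map (·.1) = nsIdx tok 0 :=
      pv_nsIdx_enum tok 0
    -- A's stripped lengths are the non-space counts
    have hOlen : FO.1.length = og.countP (· != ' ') := by
      rw [hO.1]
      have : (((PySem.List.enumerate og 0).filter (fun p => p.2 != ' ')).map (·.2)).length
          = (((PySem.List.enumerate og 0).filter (fun p => p.2 != ' ')).map (·.1)).length := by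
        simp
      simpa [this, heo] using pv_nsIdx_length og 0
    have hTlen : FT.1.length = tok.countP (· != ' ') := by
      rw [hT.1]
      have : (((PySem.List.enumerate tok 0).filter (fun p => p.2 != ' ')).map (·.2)).length
          = (((PySem.List.enumerate tok 0).filter (fun p => p.2 != ' ')).map (·.1)).length := by
        simp
      simpa [this, het] using pv_nsIdx_length tok 0
    by_cases hl : og.countP (· != ' ') = tok.countP (· != ' ')
    · have hcondA : ¬ FO.1.length ≠ FT.1.length := by rw [hOlen, hTlen]; simp [hl]
      rw [if_neg hcondA, if_neg (by simpa using hl)]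
      -- the inverted dict
      set dinv := PySem.Dict.ofList (FT.2.items.map (fun p => (p.2, p.1))) with hdinv
      have htn : (nsIdx tok 0).Nodup := by
        rw [← het]
        have hp : ((PySem.List.enumerate tok 0).filter (fun p => p.2 != ' ')).Pairwise (fun p q => p.1 < q.1) :=
          (PySem.List.pairwise_lt_enumerate tok 0).filter _
        exact (List.pairwise_map.mpr hp).imp ne_of_lt
      have hswap : (FT.2.items.map (fun p => (p.2, p.1)))
          = ((nsIdx tok 0).zipIdx 0).map (fun q => (q.1, (q.2 : Int))) := by
        rw [hT.2, het]; simp [List.map_map, Function.comp_def]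
      have hinv_items : dinv.items = ((nsIdx tok 0).zipIdx 0).map (fun q => (q.1, (q.2 : Int))) := by
        rw [hdinv, hswap]
        exact pv_items_ofList _ (by rw [pv_zip_fst]; exact htn)
      have horig_items : FO.2.items = ((nsIdx og 0).zipIdx 0).map (fun q => ((q.2 : Int), q.1)) := by
        rw [hO.2, heo]
      have hMs := pv_lookup_rank tok og dinv FO.2 hinv_items horig_items htn s
      have hMe := pv_lookup_rank tok og dinv FO.2 hinv_items horig_items htn e
      clear_value s FO FT dinv
      by_cases hps : pvPosOk tok s = true
      · by_cases hpe : pvPosOk tok e = true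
        · rw [if_neg (by simp [hps, hpe])]
          rw [if_pos hps] at hMs
          rw [if_pos hpe] at hMe
          rcases h1 : dinv.get? s with _ | j1
          · simp only [h1] at hMs
            simp only [← hMs]
          · simp only [h1] at hMs
            rcases h2 : FO.2.get? j1 with _ | os
            · rw [h2] at hMs
              simp only [h2, ← hMs]
            · rw [h2] at hMs
              rcases h3 : dinv.get? e with _ | j2
              · simp only [h3] at hMe
                simp only [h2, ← hMs, ← hMe]
              · simp only [h3] at hMe
                rcases h4 : FO.2.get? j2 with _ | oe
                · rw [h4] at hMe
                  simp only [h2, h4, ← hMs, ← hMe]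
                · rw [h4] at hMe
                  simp only [h2, h4, ← hMs, ← hMe]
        · rw [if_pos (by simp [hpe])]
          rw [if_neg hpe] at hMe
          rcases h1 : dinv.get? s with _ | j1
          · rfl
          · simp only [h1] at hMs
            rcases h2 : FO.2.get? j1 with _ | os
            · simp only [h2]
            · rcases h3 : dinv.get? e with _ | j2
              · simp only [h2]
              · simp only [h3] at hMe
                simp only [h2, hMe]
      · rw [if_pos (by simp [hps])]
        rw [if_neg hps] at hMs
        rcases h1 : dinv.get? s with _ | j1
        · rfl
        · simp only [h1] at hMs
          simp only [hMs]
    · have hcondA : FO.1.length ≠ FT.1.length := by rw [hOlen, hTlen]; simpa using hl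
      rw [if_pos hcondA, if_pos (by simpa using hl)]
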